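-- pv_equiv track=rewrite | github.com/kassamateckik/-thon | Gyakorlás/2/egyedi_hosszuak.py | egyedi_hosszuak
-- ===== SOURCE A (Python) =====
-- def benne(a, lista):
--     i = 0
--     while i < len(lista) and a != lista[i]:
--         i += 1
--     return i < len(lista)
--
-- def egyedi_hosszuak(x): # Bennevan függvény
--     egyediek= []
--     hosszak = []
--     for i in range(len(x)):
--         if not benne(len(x[i]), hosszak):
--             egyediek.append(x[i])
--             hosszak.append(len(x[i]))
--     return egyediek
-- ===== SOURCE B (Python) =====
-- def egyedi_hosszuak(x):
--     first = {}
--     for i, e in reversed(list(enumerate(x))):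
--         first[len(e)] = i
--     return [e for i, e in enumerate(x) if first[len(e)] == i]
-- ===== Notes on version B (the rewrite author's own statement) =====
-- stated objective: alternative
-- what changed: Replaces A's stateful conditional pass (parallel result/seen-lengths lists plus the hand-written 'benne' linear-search helper) with a stateless staged design: a back-to-front pass unconditionally overwrites a length->first-index table, then a filter keeps each element whose index equals its length's first-occurrence index.
import Mathlib
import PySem

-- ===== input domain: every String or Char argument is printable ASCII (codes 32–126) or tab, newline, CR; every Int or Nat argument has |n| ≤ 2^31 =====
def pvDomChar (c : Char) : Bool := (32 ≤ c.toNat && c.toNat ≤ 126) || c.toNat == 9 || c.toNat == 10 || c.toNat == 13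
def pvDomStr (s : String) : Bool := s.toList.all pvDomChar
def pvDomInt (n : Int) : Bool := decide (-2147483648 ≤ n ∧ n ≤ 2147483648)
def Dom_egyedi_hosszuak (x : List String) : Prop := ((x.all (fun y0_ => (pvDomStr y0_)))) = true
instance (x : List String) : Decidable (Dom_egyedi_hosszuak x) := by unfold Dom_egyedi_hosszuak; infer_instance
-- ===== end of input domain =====

-- B replaces A's stateful conditional pass (parallel lists + 'benne' linear search) by two stateless stages:
-- a back-to-front pass overwrites a length->first-index table, then a filter keeps elements whose index is their length's first occurrence.


-- ===== PORT A =====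
-- while i < len(lista) and a != lista[i]: i += 1   (linear search by index; short-circuit 'and')
def benneLoop (a : Int) (lista : List Int) (i : Nat) : Nat :=
  if h : i < lista.length then
    if a ≠ lista[i] then benneLoop a lista (i + 1) else i
  else i
termination_by lista.length - i

def benne (a : Int) (lista : List Int) : Bool := benneLoop a lista 0 < lista.length

def egyedi_hosszuak (x : List String) : List String :=
  ((PySem.List.pyRange 0 (PySem.List.len x) 1).foldl
    (fun (st : List String × List Int) i =>
      if ¬ benne (PySem.Str.len (PySem.List.pyGetD x i "")) st.2 then
        (st.1 ++ [PySem.List.pyGetD x i ""], st.2 ++ [PySem.Str.len (PySem.List.pyGetD x i "")])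
      else st) ([], [])).1

-- ===== PORT B =====
-- first = {}; for i, e in reversed(list(enumerate(x))): first[len(e)] = i
-- return [e for i, e in enumerate(x) if first[len(e)] == i]
-- (first[len(e)] never raises: every element's length was inserted, so getD's default is never used)
def egyedi_hosszuak_alt (x : List String) : List String :=
  let first := ((PySem.List.enumerate x).reverse).foldl
    (fun (d : PySem.Dict Int Int) p => d.insert (PySem.Str.len p.2) p.1) PySem.Dict.empty
  ((PySem.List.enumerate x).filter
    (fun p => first.getD (PySem.Str.len p.2) 0 == p.1)).map (·.2)

-- ===== PRECONDITION & SPEC =====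
def Spec_egyedi_hosszuak (x : List String) (out : List String) : Prop := out = egyedi_hosszuak_alt x
instance (x : List String) (out : List String) : Decidable (Spec_egyedi_hosszuak x out) := by unfold Spec_egyedi_hosszuak; infer_instance

-- ===== CLAIM (what is proved, stated in full; the proofs are below) =====
def Claim_equal_egyedi_hosszuak : Prop := ∀ (x : List String), Dom_egyedi_hosszuak x → Spec_egyedi_hosszuak x (egyedi_hosszuak x)

-- ===== LEMMAS AND PROOFS =====

-- common characterisation: keep each element whose length is not among the lengths of the prefix 'pre'
def Gsel (pre : List Int) : List String → List String
  | [] => []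
  | e :: t =>
    if PySem.Str.len e ∈ pre then Gsel (pre ++ [PySem.Str.len e]) t
    else e :: Gsel (pre ++ [PySem.Str.len e]) t

theorem benneLoop_mem (a : Int) (lista : List Int) (i : Nat) :
    (benneLoop a lista i < lista.length) ↔ a ∈ lista.drop i := by
  rw [benneLoop]
  split
  · rename_i hi
    have hd : lista.drop i = lista[i] :: lista.drop (i + 1) := List.drop_eq_getElem_cons hi
    split
    · rename_i hne
      rw [benneLoop_mem a lista (i + 1), hd, List.mem_cons]
      constructor
      · exact Or.inr
      · rintro (rfl | hm)
        · exact absurd rfl hne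
        · exact hm
    · rename_i hne
      rw [not_ne_iff] at hne
      simp only [hi, iff_true_left]
      rw [hd, hne]
      exact List.mem_cons_self
  · rename_i hi
    simp [hi, List.drop_eq_nil_of_le (Nat.le_of_not_lt hi)]
termination_by lista.length - i

theorem benne_eq_mem (a : Int) (lista : List Int) : benne a lista = decide (a ∈ lista) := by
  simp [benne, benneLoop_mem a lista 0]

-- A's fold, with seen-lengths list 'hs' membership-equivalent to all prefix lengths 'pre', yields Gsel
theorem loopA_eq (xs : List String) (acc : List String) (hs pre : List Int)
    (hinv : ∀ a : Int, a ∈ hs ↔ a ∈ pre) :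
    (xs.foldl
      (fun (st : List String × List Int) e =>
        if ¬ benne (PySem.Str.len e) st.2 then (st.1 ++ [e], st.2 ++ [PySem.Str.len e]) else st)
      (acc, hs)).1 = acc ++ Gsel pre xs := by
  induction xs generalizing acc hs pre with
  | nil => simp [Gsel]
  | cons e t ih =>
    simp only [List.foldl_cons, Gsel]
    by_cases hm : PySem.Str.len e ∈ pre
    · have hb : benne (PySem.Str.len e) hs = true := by
        rw [benne_eq_mem, decide_eq_true_eq]; exact (hinv _).2 hm
      rw [if_neg (by rw [hb]; simp), if_pos hm]
      exact ih acc hs (pre ++ [PySem.Str.len e])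
        (fun a => by
          rw [hinv a, List.mem_append, List.mem_singleton]
          exact ⟨Or.inl, fun h => h.elim id (fun h => h ▸ hm)⟩)
    · have hb : benne (PySem.Str.len e) hs = false := by
        rw [benne_eq_mem, decide_eq_false_iff_not]
        exact fun h => hm ((hinv _).1 h)
      rw [if_pos (by rw [hb]; simp), if_neg hm]
      rw [ih (acc ++ [e]) (hs ++ [PySem.Str.len e]) (pre ++ [PySem.Str.len e])
        (fun a => by simp [hinv a]), List.append_assoc]
      rfl

-- index of a member of 'pre' is below pre.length
theorem index?_lt_of_mem (pre : List Int) (v : Int) (k : Nat)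
    (h : PySem.List.index? pre v = some k) : k < pre.length := by
  obtain ⟨hk, _, _⟩ := PySem.List.getElem_of_index?_eq_some h
  exact hk

-- B's filtered enumeration, started after a processed prefix 'pre' of lengths, yields Gsel
theorem loopB_eq (xs : List String) (pre : List Int) :
    ((PySem.List.enumerate xs (pre.length : Int)).filter
      (fun p => (PySem.List.index? (pre ++ xs.map PySem.Str.len) (PySem.Str.len p.2)).map
        (Int.ofNat) == some p.1)).map (·.2) = Gsel pre xs := by
  induction xs generalizing pre with
  | nil => simp [PySem.List.enumerate_nil, Gsel]
  | cons e t ih =>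
    have hsplit : pre ++ (e :: t).map PySem.Str.len
        = (pre ++ [PySem.Str.len e]) ++ t.map PySem.Str.len := by simp
    rw [PySem.List.enumerate_cons, hsplit, List.filter_cons]
    by_cases hm : PySem.Str.len e ∈ pre
    · have hidx : PySem.List.index? ((pre ++ [PySem.Str.len e]) ++ t.map PySem.Str.len)
          (PySem.Str.len e) = PySem.List.index? pre (PySem.Str.len e) := by
        rw [PySem.List.index?_append_of_mem _ (by simp),
            PySem.List.index?_append_of_mem _ hm]
      obtain ⟨k, hk⟩ := Option.isSome_iff_exists.mp
        ((PySem.List.index?_isSome_iff _ _).mpr hm)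
      have hlt := index?_lt_of_mem pre (PySem.Str.len e) k hk
      have hcond : ((PySem.List.index? ((pre ++ [PySem.Str.len e]) ++ t.map PySem.Str.len)
          (PySem.Str.len e)).map (Int.ofNat) == some ((pre.length : Nat) : Int)) = false := by
        rw [hidx, hk]
        simp only [Option.map_some, beq_eq_false_iff_ne, ne_eq, Option.some.injEq]
        intro h
        rw [Int.ofNat_eq_natCast] at h
        omega
      simp only [hcond, Bool.false_eq_true, if_false, Gsel]
      rw [if_pos hm]
      have := ih (pre ++ [PySem.Str.len e])
      simpa using this
    · have hidx : PySem.List.index? ((pre ++ [PySem.Str.len e]) ++ t.map PySem.Str.len)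
          (PySem.Str.len e) = some pre.length := by
        rw [PySem.List.index?_append_of_mem _ (by simp),
            PySem.List.index?_append_singleton_self pre (PySem.Str.len e) hm]
      have hcond : ((PySem.List.index? ((pre ++ [PySem.Str.len e]) ++ t.map PySem.Str.len)
          (PySem.Str.len e)).map (Int.ofNat) == some ((pre.length : Nat) : Int)) = true := by
        rw [hidx]; simp
      simp only [hcond, if_true, List.map_cons, Gsel]
      rw [if_neg hm]
      have := ih (pre ++ [PySem.Str.len e])
      simpa using this

-- the back-to-front overwriting fold: the table holds the FIRST pair for each key of ps
theorem getD_revfold (ps : List (Int × String)) (d : PySem.Dict Int Int) (v df : Int) :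
    ((ps.reverse).foldl (fun (d : PySem.Dict Int Int) p => d.insert (PySem.Str.len p.2) p.1) d).getD v df
    = ((ps.find? (fun p => PySem.Str.len p.2 == v)).map (·.1)).getD (d.getD v df) := by
  induction ps generalizing d with
  | nil => simp
  | cons p t ih =>
    rw [List.reverse_cons, List.foldl_append, List.foldl_cons, List.foldl_nil,
        PySem.Dict.getD_insert]
    by_cases h : PySem.Str.len p.2 = v
    · rw [List.find?_cons_of_pos (by simpa using h), if_pos h.symm]
      simp
    · rw [List.find?_cons_of_neg (by simpa using h), if_neg (fun hv => h hv.symm), ih]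

-- find? on the enumeration locates the first index whose length matches, at index? of the length list
theorem find?_enum (t : List String) (s v : Int) (k : Nat)
    (h : PySem.List.index? (t.map PySem.Str.len) v = some k) :
    ∃ _ : k < t.length,
      (PySem.List.enumerate t s).find? (fun p => PySem.Str.len p.2 == v) = some (s + (k : Int), t[k]!) := by
  induction t generalizing s k with
  | nil => simp [PySem.List.index?_eq_idxOf?] at h
  | cons e t ih =>
    rw [List.map_cons] at h
    by_cases he : PySem.Str.len e = v
    · rw [he, PySem.List.index?_cons_self] at h
      obtain rfl : k = 0 := by simpa using h.symm
      refine ⟨by simp, ?_⟩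
      rw [PySem.List.enumerate_cons, List.find?_cons_of_pos (by simpa using he)]
      simp
    · rw [PySem.List.index?_cons_of_ne _ he] at h
      obtain ⟨k', hk', rfl⟩ := Option.map_eq_some_iff.mp h
      obtain ⟨hlt, hfind⟩ := ih (s + 1) k' hk'
      refine ⟨by simpa using Nat.succ_lt_succ hlt, ?_⟩
      rw [PySem.List.enumerate_cons, List.find?_cons_of_neg (by simpa using he), hfind]
      have h1 : s + 1 + (k' : Int) = s + ((k' + 1 : Nat) : Int) := by push_cast; ring
      have h2 : (e :: t)[k' + 1]! = t[k']! := by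
        simp [List.getElem!_eq_getElem?_getD]
      rw [h1, h2]

-- B's filter condition coincides with the first-occurrence-index condition on every enumerated pair
theorem altB_eq (x : List String) :
    egyedi_hosszuak_alt x = ((PySem.List.enumerate x).filter
      (fun p => (PySem.List.index? (x.map PySem.Str.len) (PySem.Str.len p.2)).map
        (Int.ofNat) == some p.1)).map (·.2) := by
  rw [show egyedi_hosszuak_alt x = ((PySem.List.enumerate x).filter
      (fun p => (((PySem.List.enumerate x).reverse).foldl
          (fun (d : PySem.Dict Int Int) p => d.insert (PySem.Str.len p.2) p.1)
          PySem.Dict.empty).getD (PySem.Str.len p.2) 0 == p.1)).map (·.2) from rfl]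
  congr 1
  apply List.filter_congr
  intro p hp
  obtain ⟨k, hk, rfl⟩ := (PySem.List.mem_enumerate_iff x 0 p).1 hp
  have hmem : PySem.Str.len x[k] ∈ x.map PySem.Str.len :=
    List.mem_map_of_mem (x.getElem_mem hk)
  obtain ⟨k0, hk0⟩ := Option.isSome_iff_exists.mp ((PySem.List.index?_isSome_iff _ _).mpr hmem)
  obtain ⟨hk0lt, hfind⟩ := find?_enum x 0 (PySem.Str.len x[k]) k0 hk0
  rw [getD_revfold, hfind, hk0]
  simp only [Option.map_some, Option.getD_some]
  by_cases hke : k0 = k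
  · subst hke; simp
  · have h1 : ((0 : Int) + (k0 : Int) == 0 + (k : Int)) = false := by
      simp; omega
    have h2 : ((some (Int.ofNat k0) : Option Int) == some ((0 : Int) + (k : Int))) = false := by
      simp [Int.ofNat_eq_natCast]; omega
    rw [h1, h2]

-- ===== VERDICT (by name: the statement is the Claim_ definition above) =====
theorem egyedi_hosszuak_spec : Claim_equal_egyedi_hosszuak := by
  intro x _
  unfold Spec_egyedi_hosszuak egyedi_hosszuak
  rw [PySem.List.foldl_pyRange_zero_pyGetD x ""
    (fun (st : List String × List Int) e =>
      if ¬ benne (PySem.Str.len e) st.2 then (st.1 ++ [e], st.2 ++ [PySem.Str.len e]) else st)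
    ([], [])]
  rw [loopA_eq x [] [] [] (fun a => Iff.rfl), altB_eq]
  have := loopB_eq x []
  simpa using this.symm
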